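-- pv_equiv track=rewrite | github.com/n-k-t/dmap | dmap/lower2.py | _merge_adjacent_contiguous_strides
-- ===== SOURCE A (Python) =====
-- def _merge_adjacent_contiguous_strides(shape: list[int], stride: list[int]) -> tuple[list[int], list[int]]:
--     new_shape = []
--     new_stride = []
--
--     temp_sh = None
--
--     for sh, st in zip(reversed(shape), reversed(stride)):
--         if st == 0:
--             if len(new_stride) > 0:
--                 if new_stride[-1] == 0:
--                     temp_sh *= sh
--                     new_shape[-1] = temp_sh
--                     continue
--             new_shape.append(sh)
--             new_stride.append(st)
--             temp_sh = sh
--         else: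
--             if len(new_stride) > 0:
--                 if new_stride[-1] != 0:
--                     if st == (new_stride[-1] * temp_sh):
--                         temp_sh *= sh
--                         new_shape[-1] = temp_sh
--                         continue
--             new_shape.append(sh)
--             new_stride.append(st)
--             temp_sh = sh
--
--     if 1 in new_shape:
--         raise ValueError("A '1' in the tensor's shape could not be merged with its surrounding dimensions.")
--
--     new_shape.reverse()
--     new_stride.reverse()
--
--     return (new_shape, new_stride)
-- ===== SOURCE B (Python) =====
-- def _merge_adjacent_contiguous_strides(shape: list[int], stride: list[int]) -> tuple[list[int], list[int]]:
--     # Align innermost dims (as zip(reversed, reversed) does), back in original order.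
--     dims = list(zip(reversed(shape), reversed(stride)))
--     dims.reverse()
--     # Stage 1: local contiguity flag between each dim and its inner neighbour
--     # (equivalent to A's running-product test: for a merged inner group with
--     # innermost stride g and shape product q, g*q == st_inner*sh_inner).
--     fused = [
--         (st == 0 and st_in == 0) or (st != 0 and st_in != 0 and st == st_in * sh_in)
--         for (sh, st), (sh_in, st_in) in zip(dims, dims[1:])
--     ]
--     # Stage 2: one forward pass; accumulate the shape product and emit a
--     # (product, stride) pair at each non-fused boundary.
--     new_shape = []
--     new_stride = []
--     prod = 1
--     for (sh, st), m in zip(dims, fused + [False]):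
--         prod *= sh
--         if not m:
--             new_shape.append(prod)
--             new_stride.append(st)
--             prod = 1
--     if 1 in new_shape:
--         raise ValueError("A '1' in the tensor's shape could not be merged with its surrounding dimensions.")
--     return (new_shape, new_stride)
-- ===== Notes on version B (the rewrite author's own statement) =====
-- stated objective: alternative
-- what changed: A makes one innermost-to-outermost pass carrying a running group product (temp_sh), testing each stride against last_stride*temp_sh and overwriting new_shape[-1], then reverses both outputs; B is staged and forward: it first computes a per-boundary local contiguity flag (st == st_inner*sh_inner, zeros only with zeros) from adjacent dims alone, then a single forward pass multiplies shapes and emits a (product, stride) pair at each non-fused boundary, with no reversal, no in-place overwrite and no carried comparison state.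
import Mathlib
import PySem

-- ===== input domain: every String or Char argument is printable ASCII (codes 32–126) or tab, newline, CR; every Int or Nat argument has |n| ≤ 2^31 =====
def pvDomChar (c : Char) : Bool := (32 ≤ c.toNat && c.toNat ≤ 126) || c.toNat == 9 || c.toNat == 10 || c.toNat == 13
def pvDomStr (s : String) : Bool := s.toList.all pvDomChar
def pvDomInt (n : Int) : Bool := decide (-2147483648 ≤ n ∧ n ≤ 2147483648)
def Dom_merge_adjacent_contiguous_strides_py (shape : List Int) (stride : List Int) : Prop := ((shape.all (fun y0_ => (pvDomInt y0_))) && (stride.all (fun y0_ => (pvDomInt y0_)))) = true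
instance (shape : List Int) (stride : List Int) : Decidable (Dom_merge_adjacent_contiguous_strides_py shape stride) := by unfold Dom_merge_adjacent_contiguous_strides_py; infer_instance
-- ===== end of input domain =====

-- B replaces A's reversed pass with its running group product (temp_sh) and in-place
-- new_shape[-1] overwrite by a staged forward computation: local per-boundary contiguity
-- flags first, then one forward pass emitting (shape product, stride) at each boundary
-- (alternative decomposition, same cost).

-- ===== PORT A =====
-- A's loop state: (new_shape, new_stride, temp_sh); new_shape[-1] overwrite = dropLast ++ [t]
def pyAStep (acc : List Int × List Int × Option Int) (p : Int × Int) : List Int × List Int × Option Int :=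
  let ns := acc.1; let nt := acc.2.1; let temp := acc.2.2
  let sh := p.1; let st := p.2
  if st = 0 then
    if nt.length > 0 ∧ nt.getLastD 0 = 0 then
      let t := temp.getD 0 * sh   -- temp is always `some` here (new_stride nonempty)
      (ns.dropLast ++ [t], nt, some t)
    else (ns ++ [sh], nt ++ [st], some sh)
  else
    if nt.length > 0 ∧ nt.getLastD 0 ≠ 0 ∧ st = nt.getLastD 0 * temp.getD 0 then
      let t := temp.getD 0 * sh
      (ns.dropLast ++ [t], nt, some t)
    else (ns ++ [sh], nt ++ [st], some sh)

-- On inputs where the Python raises ValueError (1 ∈ new_shape, excluded by Pre_) the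
-- port simply returns the reversed lists.
def merge_adjacent_contiguous_strides_py (shape : List Int) (stride : List Int) : List Int × List Int :=
  let r := ((shape.reverse).zip (stride.reverse)).foldl pyAStep ([], [], none)
  (r.1.reverse, r.2.1.reverse)

-- ===== PORT B =====
-- Stage-1 predicate: local contiguity between a dim p and its inner neighbour q
def locFused (p q : Int × Int) : Bool :=
  (p.2 == 0 && q.2 == 0) || (p.2 != 0 && q.2 != 0 && p.2 == q.2 * q.1)

-- Stage-2 step: accumulate the shape product; emit a pair at each non-fused boundary
def bStep (acc : List Int × List Int × Int) (x : (Int × Int) × Bool) : List Int × List Int × Int :=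
  let prod := acc.2.2 * x.1.1
  if x.2 then (acc.1, acc.2.1, prod)
  else (acc.1 ++ [prod], acc.2.1 ++ [x.1.2], 1)

-- On inputs where the Python raises ValueError (excluded by Pre_) the port returns the lists anyway.
def merge_adjacent_contiguous_strides_py_alt (shape : List Int) (stride : List Int) : List Int × List Int :=
  let dims := ((shape.reverse).zip (stride.reverse)).reverse
  let fused := (dims.zip dims.tail).map (fun pq => locFused pq.1 pq.2)
  let r := (dims.zip (fused ++ [false])).foldl bStep ([], [], 1)
  (r.1, r.2.1)

-- ===== PRECONDITION & SPEC =====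
-- gmerge: an independent recursive characterisation of the merged (shape, stride) lists,
-- used only to state the raise condition of the Python (and by the proofs below).
def gmerge : List (Int × Int) → List Int × List Int
  | [] => ([], [])
  | [d] => ([d.1], [d.2])
  | d :: r :: rest =>
    let p := gmerge (r :: rest)
    if locFused d r then (d.1 * p.1.headD 1 :: p.1.tail, p.2)
    else (d.1 :: p.1, d.2 :: p.2)

-- Pre_ excludes exactly the inputs on which the Python A raises ValueError: a 1 remaining
-- among the merged shape entries (that condition inherently depends on the merged result).
def Pre_merge_adjacent_contiguous_strides_py (shape : List Int) (stride : List Int) : Prop :=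
  ¬ (1 : Int) ∈ (gmerge (((shape.reverse).zip (stride.reverse)).reverse)).1
instance (shape : List Int) (stride : List Int) : Decidable (Pre_merge_adjacent_contiguous_strides_py shape stride) := by unfold Pre_merge_adjacent_contiguous_strides_py; infer_instance
def pvWitness_merge_adjacent_contiguous_strides_py : List Int × List Int := ([2, 2], [2, 1])
def Spec_merge_adjacent_contiguous_strides_py (shape : List Int) (stride : List Int) (out : List Int × List Int) : Prop := out = merge_adjacent_contiguous_strides_py_alt shape stride
instance (shape : List Int) (stride : List Int) (out : List Int × List Int) : Decidable (Spec_merge_adjacent_contiguous_strides_py shape stride out) := by unfold Spec_merge_adjacent_contiguous_strides_py; infer_instance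

-- ===== CLAIM (what is proved, stated in full; the proofs are below) =====
def Claim_equal_merge_adjacent_contiguous_strides_py : Prop := ∀ (shape : List Int) (stride : List Int), Dom_merge_adjacent_contiguous_strides_py shape stride → Pre_merge_adjacent_contiguous_strides_py shape stride → Spec_merge_adjacent_contiguous_strides_py shape stride (merge_adjacent_contiguous_strides_py shape stride)

-- ===== LEMMAS AND PROOFS =====

theorem locFused_iff (p q : Int × Int) :
    locFused p q = true ↔
      ((p.2 = 0 ∧ q.2 = 0) ∨ (p.2 ≠ 0 ∧ q.2 ≠ 0 ∧ p.2 = q.2 * q.1)) := by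
  simp only [locFused, Bool.or_eq_true, Bool.and_eq_true, beq_iff_eq, bne_iff_ne, ne_eq]
  tauto

-- gmerge on a nonempty list yields nonempty lists
theorem gmerge_cons (l : List (Int × Int)) :
    ∀ d : Int × Int, ∃ x X y Y, gmerge (d :: l) = (x :: X, y :: Y) := by
  induction l with
  | nil => intro d; exact ⟨d.1, [], d.2, [], rfl⟩
  | cons r rest ih =>
    intro d
    obtain ⟨x, X, y, Y, h⟩ := ih r
    simp only [gmerge, h]
    by_cases hf : locFused d r = true
    · exact ⟨d.1 * x, X, y, Y, by simp [hf]⟩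
    · exact ⟨d.1, x :: X, d.2, y :: Y, by simp [hf]⟩

-- A's fold, processed from the outermost side: the state after a list of dims is
-- gmerge's answer (reversed), with temp_sh = head of the merged shape, together with the
-- two facts making A's running test equal the local test against the head dim.
theorem pyA_state (d : Int × Int) (l : List (Int × Int)) :
    (d :: l).reverse.foldl pyAStep ([], [], none) =
      ((gmerge (d :: l)).1.reverse, (gmerge (d :: l)).2.reverse,
        some ((gmerge (d :: l)).1.headD 1)) ∧
    ((gmerge (d :: l)).2.headD 1 = 0 ↔ d.2 = 0) ∧
    (gmerge (d :: l)).2.headD 1 * (gmerge (d :: l)).1.headD 1 = d.2 * d.1 := by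
  induction l generalizing d with
  | nil =>
    refine ⟨?_, by simp [gmerge], by simp [gmerge, mul_comm]⟩
    by_cases h : d.2 = 0 <;> simp [pyAStep, gmerge, h]
  | cons r rest ih =>
    obtain ⟨hst, hz, hp⟩ := ih r
    obtain ⟨x, X, y, Y, hg⟩ := gmerge_cons rest r
    rw [hg] at hst hz hp
    simp only [List.headD_cons] at hst hz hp
    have hrev : (d :: r :: rest).reverse = (r :: rest).reverse ++ [d] := by simp
    rw [hrev, List.foldl_append, hst]
    simp only [List.foldl_cons, List.foldl_nil]
    have hlast : (y :: Y).reverse.getLastD 0 = y := by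
      simp [List.getLastD_eq_getLast?, List.getLast?_reverse]
    have hlen : (y :: Y).reverse.length > 0 := by simp
    have hA_iff : ((d.2 = 0 ∧ y = 0) ∨ (d.2 ≠ 0 ∧ y ≠ 0 ∧ d.2 = y * x)) ↔
        locFused d r = true := by
      rw [locFused_iff]
      constructor
      · rintro (⟨h1, h2⟩ | ⟨h1, h2, h3⟩)
        · exact Or.inl ⟨h1, hz.mp h2⟩
        · exact Or.inr ⟨h1, fun hr => h2 (hz.mpr hr), by rw [h3, hp]⟩
      · rintro (⟨h1, h2⟩ | ⟨h1, h2, h3⟩)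
        · exact Or.inl ⟨h1, hz.mpr h2⟩
        · exact Or.inr ⟨h1, fun hy => h2 (hz.mp hy), by rw [h3, ← hp]⟩
    by_cases hf : locFused d r = true
    · -- fused: A overwrites the last entry; gmerge multiplies into the head
      have hm := hA_iff.mpr hf
      have hstep : pyAStep ((x :: X).reverse, (y :: Y).reverse, some x) d =
          ((x * d.1 :: X).reverse, (y :: Y).reverse, some (x * d.1)) := by
        rcases hm with ⟨h1, h2⟩ | ⟨h1, h2, h3⟩
        · simp [pyAStep, h1, hlast, h2, hlen, List.reverse_cons, List.dropLast_concat]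
        · have hq : x ≠ 0 := fun h => h1 (by rw [h3, h, mul_zero])
          simp [pyAStep, h1, hlast, h2, h3, hq, hlen, List.reverse_cons,
            List.dropLast_concat]
      rw [hstep]
      simp only [gmerge, hg, hf, if_true, List.headD_cons, List.tail_cons]
      refine ⟨by rw [mul_comm], ?_, ?_⟩
      · constructor
        · intro hy
          rcases hm with ⟨h1, _⟩ | ⟨_, h2, _⟩
          · exact h1
          · exact absurd hy h2
        · intro hd
          rcases hm with ⟨_, h2⟩ | ⟨h1, _, _⟩
          · exact h2
          · exact absurd hd h1
      · rcases hm with ⟨h1, h2⟩ | ⟨h1, h2, h3⟩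
        · simp [h1, h2]
        · rw [h3]; ring
    · -- not fused: A appends a fresh entry; gmerge opens a new group
      have hm : ¬ ((d.2 = 0 ∧ y = 0) ∨ (d.2 ≠ 0 ∧ y ≠ 0 ∧ d.2 = y * x)) := fun h =>
        hf (hA_iff.mp h)
      push_neg at hm
      obtain ⟨hm0, hm1⟩ := hm
      have hstep : pyAStep ((x :: X).reverse, (y :: Y).reverse, some x) d =
          ((x :: X).reverse ++ [d.1], (y :: Y).reverse ++ [d.2], some d.1) := by
        by_cases h1 : d.2 = 0
        · simp [pyAStep, h1, hlast, hm0 h1]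
        · by_cases h2 : y = 0
          · simp [pyAStep, h1, hlast, h2]
          · simp [pyAStep, h1, hlast, h2, hlen, hm1 h1 h2]
      rw [hstep]
      simp only [gmerge, hg, hf, Bool.false_eq_true, if_false, List.headD_cons,
        List.tail_cons]
      exact ⟨by simp, by simp, by simp⟩

-- B's fold with nonempty output accumulators just prefixes them
theorem bStep_prefix (l : List ((Int × Int) × Bool)) : ∀ (S T : List Int) (p : Int),
    l.foldl bStep (S, T, p) =
      (S ++ (l.foldl bStep ([], [], p)).1, T ++ (l.foldl bStep ([], [], p)).2.1,
        (l.foldl bStep ([], [], p)).2.2) := by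
  induction l with
  | nil => intro S T p; simp
  | cons x l ih =>
    intro S T p
    simp only [List.foldl_cons]
    by_cases hx : x.2
    · simp only [bStep, hx, if_true]
      rw [ih]
    · simp only [bStep, hx, if_false, Bool.false_eq_true, List.nil_append]
      rw [ih (S ++ [p * x.1.1]) (T ++ [x.1.2]) 1, ih [p * x.1.1] [x.1.2] 1]
      simp

-- scaling the initial product scales the first emitted shape (or the pending product)
def scaleHead (p : Int) : List Int × List Int × Int → List Int × List Int × Int
  | ([], T, q) => ([], T, p * q)
  | (x :: X, T, q) => (p * x :: X, T, q)

theorem bStep_scale (l : List ((Int × Int) × Bool)) : ∀ (p : Int),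
    l.foldl bStep ([], [], p) = scaleHead p (l.foldl bStep ([], [], 1)) := by
  induction l with
  | nil => intro p; simp [scaleHead]
  | cons x l ih =>
    intro p
    simp only [List.foldl_cons]
    by_cases hx : x.2
    · simp only [bStep, hx, if_true]
      rw [ih (p * x.1.1), ih (1 * x.1.1)]
      rcases h : l.foldl bStep ([], [], 1) with ⟨S, T, q⟩
      cases S <;> simp [scaleHead, mul_assoc]
    · simp only [bStep, hx, if_false, Bool.false_eq_true, List.nil_append]
      rw [bStep_prefix l [p * x.1.1] [x.1.2] 1, bStep_prefix l [1 * x.1.1] [x.1.2] 1]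
      simp [scaleHead]

-- B's staged forward computation equals gmerge
theorem bfold_eq_gmerge (dims : List (Int × Int)) :
    ((dims.zip ((dims.zip dims.tail).map (fun pq => locFused pq.1 pq.2) ++ [false])).foldl
        bStep ([], [], 1)).1 = (gmerge dims).1 ∧
    ((dims.zip ((dims.zip dims.tail).map (fun pq => locFused pq.1 pq.2) ++ [false])).foldl
        bStep ([], [], 1)).2.1 = (gmerge dims).2 := by
  induction dims with
  | nil => simp [gmerge]
  | cons d l ih =>
    cases l with
    | nil => simp [gmerge, bStep]
    | cons r rest =>
      simp only [List.tail_cons] at ih ⊢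
      have hzip : ((d :: r :: rest).zip
          (((d :: r :: rest).zip (r :: rest)).map (fun pq => locFused pq.1 pq.2) ++ [false])) =
          (d, locFused d r) ::
            ((r :: rest).zip (((r :: rest).zip rest).map
              (fun pq => locFused pq.1 pq.2) ++ [false])) := by
        simp [List.zip]
      rw [hzip]
      simp only [List.foldl_cons]
      by_cases hf : locFused d r = true
      · simp only [bStep, hf, if_true]
        rw [show ((1 : Int) * d.1) = d.1 by ring, bStep_scale]
        obtain ⟨x, X, y, Y, hg⟩ := gmerge_cons rest r
        obtain ⟨ih1, ih2⟩ := ih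
        rw [hg] at ih1 ih2
        rcases hh : ((r :: rest).zip (((r :: rest).zip rest).map
            (fun pq => locFused pq.1 pq.2) ++ [false])).foldl bStep ([], [], 1) with ⟨S, T, q⟩
        rw [hh] at ih1 ih2
        simp only at ih1 ih2
        subst ih1 ih2
        simp [gmerge, hg, hf, scaleHead]
      · simp only [bStep, hf, if_false, Bool.false_eq_true, List.nil_append]
        rw [bStep_prefix _ [1 * d.1] [d.2] 1]
        obtain ⟨ih1, ih2⟩ := ih
        simp [gmerge, hf, ih1, ih2]

-- A's port equals gmerge of the dims list
theorem pyA_eq_gmerge (dims : List (Int × Int)) :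
    ((dims.reverse.foldl pyAStep ([], [], none)).1.reverse,
      (dims.reverse.foldl pyAStep ([], [], none)).2.1.reverse) = gmerge dims := by
  cases dims with
  | nil => simp [gmerge]
  | cons d l =>
    obtain ⟨hst, -, -⟩ := pyA_state d l
    rw [hst]
    simp

-- ===== VERDICT (by name: the statement is the Claim_ definition above) =====
theorem merge_adjacent_contiguous_strides_py_spec : Claim_equal_merge_adjacent_contiguous_strides_py := by
  intro shape stride _ _
  unfold Spec_merge_adjacent_contiguous_strides_py merge_adjacent_contiguous_strides_py
    merge_adjacent_contiguous_strides_py_alt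
  obtain ⟨hb1, hb2⟩ := bfold_eq_gmerge ((shape.reverse.zip stride.reverse).reverse)
  have ha := pyA_eq_gmerge ((shape.reverse.zip stride.reverse).reverse)
  rw [List.reverse_reverse] at ha
  dsimp only
  rw [ha, hb1, hb2]
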